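-- pv_equiv track=rewrite | github.com/cielavenir/checkio | climbing-route.py | mountaintop
-- ===== SOURCE A (Python) =====
-- D=((-1,0),(0,-1),(1,0),(0,1))
--
-- def inside(data,y,x):
-- 	return 0<=y<len(data) and 0<=x<len(data[0])
--
-- def mountaintop(data,y,x):
-- 	if not inside(data,y,x) or data[y][x]==0: return (0,y,x)
-- 	r=(data[y][x],y,x)
-- 	data[y][x]=0
-- 	for dx,dy in D:
-- 		q=mountaintop(data,y+dy,x+dx)
-- 		if r[0]<q[0]: r=q
-- 	return r
-- ===== SOURCE B (Python) =====
-- # B: iterative flood fill with an explicit stack (event-driven DFS) instead of A's recursion;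
-- # like A it zeroes the visited region in data (same in-place mutation).
-- D=((-1,0),(0,-1),(1,0),(0,1))
--
-- def inside(data,y,x):
--     return 0<=y<len(data) and 0<=x<len(data[0])
--
-- def mountaintop(data,y,x):
--     best=None
--     stack=[(y,x)]
--     while stack:
--         cy,cx=stack.pop()
--         if not inside(data,cy,cx) or data[cy][cx]==0:
--             cand=(0,cy,cx)
--         else:
--             cand=(data[cy][cx],cy,cx)
--             data[cy][cx]=0
--             for dx,dy in reversed(D):
--                 stack.append((cy+dy,cx+dx))
--         if best is None or best[0]<cand[0]:
--             best=cand
--     return best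
-- ===== Notes on version B (the rewrite author's own statement) =====
-- stated objective: alternative
-- what changed: Replaces A's recursive flood fill by an iterative DFS with an explicit stack: pop a cell, re-check the guard at pop time, fold each pop event (invalid cell = value 0) into a running best with strict '<', and push the four neighbours in reverse order so they are visited in A's order; same in-place zeroing of the region.
-- outside the precondition, e.g. on mountaintop([[1, 0], [0]], 0, 0): A returns (1, 0, 0), B returns (1, 0, 0)
import Mathlib
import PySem

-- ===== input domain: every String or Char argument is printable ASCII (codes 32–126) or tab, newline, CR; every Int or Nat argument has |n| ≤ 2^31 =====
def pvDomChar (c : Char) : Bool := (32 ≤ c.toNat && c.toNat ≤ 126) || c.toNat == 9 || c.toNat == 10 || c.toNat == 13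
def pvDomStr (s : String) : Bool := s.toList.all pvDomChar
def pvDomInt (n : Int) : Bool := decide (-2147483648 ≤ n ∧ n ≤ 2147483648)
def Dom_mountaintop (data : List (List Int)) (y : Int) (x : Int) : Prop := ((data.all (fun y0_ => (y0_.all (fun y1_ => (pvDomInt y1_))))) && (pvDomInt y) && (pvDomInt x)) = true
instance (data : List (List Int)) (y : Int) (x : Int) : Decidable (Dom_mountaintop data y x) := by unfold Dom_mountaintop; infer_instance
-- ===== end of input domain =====

-- B replaces A's recursion by an explicit-stack DFS (same in-place zeroing of the region; the
-- equivalence proved here is about the return value).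

-- ===== PORT A =====

-- Python's `inside(data, y, x)`; `len(data[0])` is only reached when `0 <= y < len(data)`,
-- so `headD []` is exact there.
def insideB (d : List (List Int)) (y : Int) (x : Int) : Bool :=
  decide (0 ≤ y) && decide (y < (d.length : Int)) && decide (0 ≤ x) && decide (x < ((d.headD []).length : Int))

-- `data[y][x]`: only evaluated under the `inside` guard (indices nonnegative and in range under
-- Pre_, where it is exact); the default 0 is never the value used.
def getv (d : List (List Int)) (y : Int) (x : Int) : Int :=
  PySem.List.pyGetD (PySem.List.pyGetD d y []) x 0

-- `data[y][x] = 0`, same guard discipline.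
def setv (d : List (List Int)) (y : Int) (x : Int) : List (List Int) :=
  PySem.List.pySetD d y (PySem.List.pySetD (PySem.List.pyGetD d y []) x 0)

-- number of nonzero cells: fuel measure making A's recursion structural (the fuel never runs out).
def nz (d : List (List Int)) : Nat := (d.map (fun r => r.countP (fun a => a != 0))).sum

-- `if r[0] < q[0]: r = q`
def comb (a b : Int × Int × Int) : Int × Int × Int := if a.1 < b.1 then b else a

def Dlist : List (Int × Int) := [(-1, 0), (0, -1), (1, 0), (0, 1)]

def goA : Nat → List (List Int) → Int → Int → List (List Int) × (Int × Int × Int)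
  | 0, d, y, x => (d, (0, y, x))   -- fuel exhausted: unreachable at the chosen fuel
  | f + 1, d, y, x =>
    if !insideB d y x || (getv d y x == 0) then (d, (0, y, x))
    else
      Dlist.foldl (fun st dd =>
        let q := goA f st.1 (y + dd.2) (x + dd.1)
        (q.1, comb st.2 q.2)) (setv d y x, (getv d y x, y, x))

def mountaintop (data : List (List Int)) (y : Int) (x : Int) : Int × Int × Int :=
  (goA (nz data + 1) data y x).2

-- ===== PORT B =====

-- `if best is None or best[0] < cand[0]: best = cand`
def combO : Option (Int × Int × Int) → (Int × Int × Int) → Option (Int × Int × Int)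
  | none, c => some c
  | some b, c => some (comb b c)

-- the while-loop over the explicit stack (list head = top of stack); fuel never runs out.
def goB : Nat → List (List Int) → Option (Int × Int × Int) → List (Int × Int) →
    List (List Int) × Option (Int × Int × Int)
  | _, d, o, [] => (d, o)
  | 0, d, o, _ :: _ => (d, o)   -- fuel exhausted: unreachable at the chosen fuel
  | f + 1, d, o, (cy, cx) :: s =>
    if !insideB d cy cx || (getv d cy cx == 0) then
      goB f d (combO o (0, cy, cx)) s
    else
      goB f (setv d cy cx) (combO o (getv d cy cx, cy, cx))
        ((cy, cx - 1) :: (cy - 1, cx) :: (cy, cx + 1) :: (cy + 1, cx) :: s)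

def mountaintop_alt (data : List (List Int)) (y : Int) (x : Int) : Int × Int × Int :=
  ((goB (4 * nz data + 1) data none [(y, x)]).2).getD (0, y, x)   -- best is never None: the stack starts nonempty

-- ===== PRECONDITION & SPEC =====

-- A raises IndexError on ragged grids whose start cell is active: `inside` checks x against
-- len(data[0]) but rows may be shorter.  Pre_ admits every input whose start fails the guard,
-- and otherwise grids whose rows are at least as long as row 0 (A then never indexes past a row).
def Pre_mountaintop (data : List (List Int)) (y : Int) (x : Int) : Prop :=
  insideB data y x = true →
    ((∀ row ∈ data, (data.headD []).length ≤ row.length) ∨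
      (x.toNat < (data.getD y.toNat []).length ∧ (data.getD y.toNat []).getD x.toNat 0 = 0))
instance (data : List (List Int)) (y : Int) (x : Int) : Decidable (Pre_mountaintop data y x) := by
  unfold Pre_mountaintop; infer_instance

def pvWitness_mountaintop : List (List Int) × Int × Int := ([[1, 2], [3, 4]], 0, 0)

def Spec_mountaintop (data : List (List Int)) (y : Int) (x : Int) (out : Int × Int × Int) : Prop := out = mountaintop_alt data y x
instance (data : List (List Int)) (y : Int) (x : Int) (out : Int × Int × Int) : Decidable (Spec_mountaintop data y x out) := by unfold Spec_mountaintop; infer_instance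

-- ===== CLAIM (what is proved, stated in full; the proofs are below) =====
def Claim_equal_mountaintop : Prop := ∀ (data : List (List Int)) (y : Int) (x : Int), Dom_mountaintop data y x → Pre_mountaintop data y x → Spec_mountaintop data y x (mountaintop data y x)

-- ===== LEMMAS AND PROOFS =====

theorem comb_assoc (a b c : Int × Int × Int) : comb (comb a b) c = comb a (comb b c) := by
  unfold comb; split_ifs <;> first | rfl | omega

theorem combO_comb (o : Option (Int × Int × Int)) (a b : Int × Int × Int) :
    combO o (comb a b) = combO (combO o a) b := by
  cases o with
  | none => rfl
  | some r => simp [combO, comb_assoc]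

theorem countP_set_zero_lt (r : List Int) (n : Nat) (h : r.getD n 0 ≠ 0) :
    ((r.set n 0).countP (fun a => a != 0)) < r.countP (fun a => a != 0) := by
  induction r generalizing n with
  | nil => simp at h
  | cons a t ih =>
    cases n with
    | zero =>
      simp at h
      simp [h]
    | succ m =>
      simp at h
      have := ih m h
      simp [List.countP_cons]
      exact this

theorem nz_set_lt (d : List (List Int)) (yn xn : Nat) (hy : yn < d.length)
    (hv : (d.getD yn []).getD xn 0 ≠ 0) :
    nz (d.set yn ((d.getD yn []).set xn 0)) < nz d := by
  induction d generalizing yn with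
  | nil => simp at hy
  | cons r t ih =>
    cases yn with
    | zero => simpa [nz] using countP_set_zero_lt r xn hv
    | succ m =>
      simp at hy
      simpa [nz] using ih m hy hv

theorem getv_nonneg (d : List (List Int)) (y x : Int) (hy : 0 ≤ y) (hx : 0 ≤ x) :
    getv d y x = (d.getD y.toNat []).getD x.toNat 0 := by
  lift y to Nat using hy
  lift x to Nat using hx
  simp [getv]

theorem setv_nonneg (d : List (List Int)) (y x : Int) (hy : 0 ≤ y) (hx : 0 ≤ x) :
    setv d y x = d.set y.toNat ((d.getD y.toNat []).set x.toNat 0) := by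
  lift y to Nat using hy
  lift x to Nat using hx
  simp [setv]

-- all the facts the guard-false branch gives us
theorem guardFacts (d : List (List Int)) (y x : Int)
    (h : (!insideB d y x || (getv d y x == 0)) = false) :
    nz (setv d y x) < nz d ∧ nz (setv d y x) + 1 ≤ nz d := by
  have hins : insideB d y x = true := by
    cases hI : insideB d y x <;> simp [hI] at h ⊢
  have hv : getv d y x ≠ 0 := by
    simp [hins] at h; exact h
  have hc := hins
  unfold insideB at hc
  simp only [Bool.and_eq_true, decide_eq_true_eq] at hc
  obtain ⟨⟨⟨hy0, hylt⟩, hx0⟩, hxlt⟩ := hc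
  have hyn : y.toNat < d.length := by omega
  rw [setv_nonneg d y x hy0 hx0]
  rw [getv_nonneg d y x hy0 hx0] at hv
  have := nz_set_lt d y.toNat x.toNat hyn hv
  omega

theorem nzA_mono : ∀ (f : Nat) (d : List (List Int)) (y x : Int), nz (goA f d y x).1 ≤ nz d := by
  intro f
  induction f with
  | zero => intro d y x; simp [goA]
  | succ f ih =>
    intro d y x
    by_cases hg : (!insideB d y x || (getv d y x == 0)) = true
    · simp [goA, hg]
    · rw [Bool.not_eq_true] at hg
      obtain ⟨hlt, _⟩ := guardFacts d y x hg
      simp only [goA, hg, Bool.false_eq_true, if_false, Dlist, List.foldl, add_zero, ← sub_eq_add_neg]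
      have h1 := ih (setv d y x) y (x - 1)
      have h2 := ih (goA f (setv d y x) y (x - 1)).1 (y - 1) x
      have h3 := ih (goA f (goA f (setv d y x) y (x - 1)).1 (y - 1) x).1 y (x + 1)
      have h4 := ih (goA f (goA f (goA f (setv d y x) y (x - 1)).1 (y - 1) x).1 y (x + 1)).1 (y + 1) x
      omega

theorem goB_fuel : ∀ (f g : Nat) (d : List (List Int)) (o : Option (Int × Int × Int))
    (s : List (Int × Int)), 4 * nz d + s.length ≤ f → 4 * nz d + s.length ≤ g →
    goB f d o s = goB g d o s := by
  intro f
  induction f with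
  | zero =>
    intro g d o s hf hg
    have : s = [] := by
      cases s with
      | nil => rfl
      | cons c t => exfalso; simp only [List.length_cons] at hf; omega
    subst this
    cases g <;> rfl
  | succ f ih =>
    intro g d o s hf hg
    cases s with
    | nil => cases g <;> rfl
    | cons c s' =>
      obtain ⟨cy, cx⟩ := c
      cases g with
      | zero => simp at hg
      | succ g' =>
        simp only [goB]
        by_cases hgd : (!insideB d cy cx || (getv d cy cx == 0)) = true
        · rw [hgd]
          simp only [if_true]
          exact ih g' d (combO o (0, cy, cx)) s' (by simp only [List.length_cons] at hf; omega)
            (by simp only [List.length_cons] at hg; omega)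
        · rw [Bool.not_eq_true] at hgd
          obtain ⟨hlt, hle⟩ := guardFacts d cy cx hgd
          rw [hgd]
          simp only [Bool.false_eq_true, if_false]
          exact ih g' (setv d cy cx) (combO o (getv d cy cx, cy, cx)) _
            (by simp only [List.length_cons] at hf ⊢; omega)
            (by simp only [List.length_cons] at hg ⊢; omega)

theorem bridge : ∀ (fA : Nat) (d : List (List Int)) (y x : Int)
    (o : Option (Int × Int × Int)) (s : List (Int × Int)) (fB fB' : Nat),
    nz d < fA → 4 * nz d + s.length + 1 ≤ fB → 4 * nz ((goA fA d y x).1) + s.length ≤ fB' →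
    goB fB d o ((y, x) :: s) = goB fB' (goA fA d y x).1 (combO o (goA fA d y x).2) s := by
  intro fA
  induction fA with
  | zero => intro d y x o s fB fB' h; omega
  | succ f ih =>
    intro d y x o s fB fB' hA hB hB'
    cases fB with
    | zero => omega
    | succ fb =>
      by_cases hg : (!insideB d y x || (getv d y x == 0)) = true
      · have hAe : goA (f + 1) d y x = (d, (0, y, x)) := by simp [goA, hg]
        rw [hAe] at hB' ⊢
        simp only [goB, hg, if_true]
        exact goB_fuel fb fB' d (combO o (0, y, x)) s (by omega) hB'
      · rw [Bool.not_eq_true] at hg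
        obtain ⟨hlt, hle⟩ := guardFacts d y x hg
        have hAe : goA (f + 1) d y x =
            ((goA f (goA f (goA f (goA f (setv d y x) y (x - 1)).1 (y - 1) x).1 y (x + 1)).1 (y + 1) x).1,
              comb (comb (comb (comb (getv d y x, y, x)
                (goA f (setv d y x) y (x - 1)).2)
                (goA f (goA f (setv d y x) y (x - 1)).1 (y - 1) x).2)
                (goA f (goA f (goA f (setv d y x) y (x - 1)).1 (y - 1) x).1 y (x + 1)).2)
                (goA f (goA f (goA f (goA f (setv d y x) y (x - 1)).1 (y - 1) x).1 y (x + 1)).1 (y + 1) x).2) := by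
          simp only [goA, hg, Bool.false_eq_true, if_false, Dlist, List.foldl, add_zero, ← sub_eq_add_neg]
        set d0 := setv d y x with hd0
        have m0 : nz d0 + 1 ≤ nz d := hle
        have m1 := nzA_mono f d0 y (x - 1)
        set p1 := goA f d0 y (x - 1) with hp1
        have m2 := nzA_mono f p1.1 (y - 1) x
        set p2 := goA f p1.1 (y - 1) x with hp2
        have m3 := nzA_mono f p2.1 y (x + 1)
        set p3 := goA f p2.1 y (x + 1) with hp3
        have m4 := nzA_mono f p3.1 (y + 1) x
        set p4 := goA f p3.1 (y + 1) x with hp4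
        have hB'4 : 4 * nz p4.1 + s.length ≤ fB' := by rw [hAe] at hB'; exact hB'
        have step : goB (fb + 1) d o ((y, x) :: s) =
            goB fb d0 (combO o (getv d y x, y, x))
              ((y, x - 1) :: (y - 1, x) :: (y, x + 1) :: (y + 1, x) :: s) := by
          simp only [goB, hg, Bool.false_eq_true, if_false, hd0]
        rw [step]
        rw [ih d0 y (x - 1) (combO o (getv d y x, y, x)) ((y - 1, x) :: (y, x + 1) :: (y + 1, x) :: s)
              fb (4 * nz p1.1 + s.length + 4) (by omega) (by simp only [List.length_cons]; omega)
              (by rw [← hp1]; simp only [List.length_cons]; omega)]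
        rw [← hp1, ← combO_comb]
        rw [ih p1.1 (y - 1) x (combO o (comb (getv d y x, y, x) p1.2)) ((y, x + 1) :: (y + 1, x) :: s)
              (4 * nz p1.1 + s.length + 4) (4 * nz p2.1 + s.length + 3) (by omega)
              (by simp only [List.length_cons]; omega) (by rw [← hp2]; simp only [List.length_cons]; omega)]
        rw [← hp2, ← combO_comb]
        rw [ih p2.1 y (x + 1) (combO o (comb (comb (getv d y x, y, x) p1.2) p2.2)) ((y + 1, x) :: s)
              (4 * nz p2.1 + s.length + 3) (4 * nz p3.1 + s.length + 2) (by omega)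
              (by simp only [List.length_cons]; omega) (by rw [← hp3]; simp only [List.length_cons]; omega)]
        rw [← hp3, ← combO_comb]
        rw [ih p3.1 (y + 1) x (combO o (comb (comb (comb (getv d y x, y, x) p1.2) p2.2) p3.2)) s
              (4 * nz p3.1 + s.length + 2) fB' (by omega) (by omega)
              (by rw [← hp4]; exact hB'4)]
        rw [← hp4, ← combO_comb, hAe]

theorem main_eq (d : List (List Int)) (y x : Int) : mountaintop_alt d y x = mountaintop d y x := by
  unfold mountaintop_alt mountaintop
  rw [bridge (nz d + 1) d y x none [] (4 * nz d + 1) (4 * nz ((goA (nz d + 1) d y x).1))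
        (by omega) (by simp) (by simp)]
  simp [goB, combO]

-- ===== VERDICT (by name: the statement is the Claim_ definition above) =====
theorem mountaintop_spec : Claim_equal_mountaintop := by
  intro d y x _ _
  unfold Spec_mountaintop
  exact (main_eq d y x).symm
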